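-- pv_equiv track=rewrite | github.com/sharjeel-ahmed17/ai-book-hackathon | chatbot/core/rag/validator.py | _check_text_overlap
-- ===== SOURCE A (Python) =====
-- from typing import List, Dict, Any, Optional
--
-- def _check_text_overlap(response: str, context_texts: List[str]) -> bool:
--     """
--     Check if response contains text that appears in the context
--     """
--     response_lower = response.lower()
--
--     # Look for significant text overlaps (at least 5-word phrases)
--     for context_text in context_texts:
--         context_lower = context_text.lower()
--
--         # Split both into words
--         response_words = response_lower.split()
--         context_words = context_lower.split()
--
--         # Check for common phrases (at least 5 consecutive words)
--         for i in range(len(response_words) - 4):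
--             phrase = " ".join(response_words[i:i+5])
--             if len(phrase) > 10 and phrase in context_lower:  # At least 10 chars to avoid common phrases
--                 return True
--
--     return False
-- ===== SOURCE B (Python) =====
-- from typing import List
--
-- def _check_text_overlap(response: str, context_texts: List[str]) -> bool:
--     """
--     Check if response contains text that appears in the context.
--     Splits the response once and scans each candidate phrase against a single
--     newline-joined haystack of all lowered contexts (phrases never contain a
--     newline, so no match can span a context boundary).
--     """
--     words = response.lower().split()
--     haystack = "\n".join(t.lower() for t in context_texts)
--     for i in range(len(words) - 4):
--         phrase = " ".join(words[i:i + 5])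
--         if len(phrase) > 10 and phrase in haystack:
--             return True
--     return False
-- ===== Notes on version B (the rewrite author's own statement) =====
-- stated objective: faster
-- what changed: B splits the response and builds its 5-word phrases once and searches each phrase in a single newline-joined lowered haystack of all contexts, instead of A's per-context loop that re-lowers, re-splits both strings and rebuilds every phrase for every context.
import Mathlib
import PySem

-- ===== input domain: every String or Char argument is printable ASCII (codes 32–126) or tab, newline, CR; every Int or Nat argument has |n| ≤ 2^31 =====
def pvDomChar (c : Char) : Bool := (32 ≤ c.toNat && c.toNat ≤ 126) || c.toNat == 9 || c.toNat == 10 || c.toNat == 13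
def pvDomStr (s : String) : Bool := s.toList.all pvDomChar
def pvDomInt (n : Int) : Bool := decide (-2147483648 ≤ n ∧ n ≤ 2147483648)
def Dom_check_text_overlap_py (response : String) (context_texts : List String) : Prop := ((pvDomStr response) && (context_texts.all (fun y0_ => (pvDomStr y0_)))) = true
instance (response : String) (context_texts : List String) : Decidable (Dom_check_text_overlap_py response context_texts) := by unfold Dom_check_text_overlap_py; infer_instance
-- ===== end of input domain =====

-- B hoists the response's split and phrase construction out of the per-context loop and searches each
-- 5-word phrase in one newline-joined lowered haystack of all contexts (a faster constant-factor scan).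

-- ===== PORT A =====
-- inner `for i in range(len(response_words) - 4)` loop with early return
def pvInnerA (response_words : List String) (context_lower : String) : List Int → Bool
  | [] => false
  | i :: rest =>
    let phrase := PySem.Str.join " " (PySem.List.slice response_words (some i) (some (i + 5)))
    if decide (10 < PySem.Str.len phrase) && PySem.Str.isIn phrase context_lower then true
    else pvInnerA response_words context_lower rest

-- outer `for context_text in context_texts` loop with early return
def pvOuterA (response_lower : String) : List String → Bool
  | [] => false
  | context_text :: rest =>
    let context_lower := PySem.Str.lower context_text
    let response_words := PySem.Str.split₀ response_lower
    let _context_words := PySem.Str.split₀ context_lower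
    if pvInnerA response_words context_lower
        (PySem.List.pyRange 0 ((response_words.length : Int) - 4) 1) then true
    else pvOuterA response_lower rest

def check_text_overlap_py (response : String) (context_texts : List String) : Bool :=
  pvOuterA (PySem.Str.lower response) context_texts

-- ===== PORT B =====
-- `for i in range(len(words) - 4)` phrase loop against the single haystack, early return
def pvPhraseLoopB (words : List String) (haystack : String) : List Int → Bool
  | [] => false
  | i :: rest =>
    let phrase := PySem.Str.join " " (PySem.List.slice words (some i) (some (i + 5)))
    if decide (10 < PySem.Str.len phrase) && PySem.Str.isIn phrase haystack then true
    else pvPhraseLoopB words haystack rest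

def check_text_overlap_py_alt (response : String) (context_texts : List String) : Bool :=
  let words := PySem.Str.split₀ (PySem.Str.lower response)
  let haystack := PySem.Str.join "\n" (context_texts.map PySem.Str.lower)
  pvPhraseLoopB words haystack (PySem.List.pyRange 0 ((words.length : Int) - 4) 1)

-- ===== PRECONDITION & SPEC =====
def Spec_check_text_overlap_py (response : String) (context_texts : List String) (out : Bool) : Prop := out = check_text_overlap_py_alt response context_texts
instance (response : String) (context_texts : List String) (out : Bool) : Decidable (Spec_check_text_overlap_py response context_texts out) := by unfold Spec_check_text_overlap_py; infer_instance

-- ===== CLAIM (what is proved, stated in full; the proofs are below) =====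
def Claim_equal_check_text_overlap_py : Prop := ∀ (response : String) (context_texts : List String), Dom_check_text_overlap_py response context_texts → Spec_check_text_overlap_py response context_texts (check_text_overlap_py response context_texts)

-- ===== LEMMAS AND PROOFS =====

-- the phrase built from index i (shared shape of both loops; proof-only abbreviation)
def pvPhrase (words : List String) (i : Int) : String :=
  PySem.Str.join " " (PySem.List.slice words (some i) (some (i + 5)))

theorem pvInnerA_eq (ws : List String) (ctx : String) :
    ∀ l : List Int, pvInnerA ws ctx l =
      l.any (fun i => decide (10 < PySem.Str.len (pvPhrase ws i)) && PySem.Str.isIn (pvPhrase ws i) ctx)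
  | [] => rfl
  | i :: rest => by
    have hrec := pvInnerA_eq ws ctx rest
    simp only [pvInnerA, List.any_cons, hrec, pvPhrase]
    split <;> simp_all

theorem pvPhraseLoopB_eq (ws : List String) (hay : String) :
    ∀ l : List Int, pvPhraseLoopB ws hay l =
      l.any (fun i => decide (10 < PySem.Str.len (pvPhrase ws i)) && PySem.Str.isIn (pvPhrase ws i) hay)
  | [] => rfl
  | i :: rest => by
    have hrec := pvPhraseLoopB_eq ws hay rest
    simp only [pvPhraseLoopB, List.any_cons, hrec, pvPhrase]
    split <;> simp_all

theorem pvOuterA_eq (rl : String) : ∀ cts : List String,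
    pvOuterA rl cts = cts.any (fun ct =>
      pvInnerA (PySem.Str.split₀ rl) (PySem.Str.lower ct)
        (PySem.List.pyRange 0 (((PySem.Str.split₀ rl).length : Int) - 4) 1))
  | [] => rfl
  | ct :: rest => by
    cases h : pvInnerA (PySem.Str.split₀ rl) (PySem.Str.lower ct)
        (PySem.List.pyRange 0 (((PySem.Str.split₀ rl).length : Int) - 4) 1) <;>
      simp [pvOuterA, List.any_cons, ← pvOuterA_eq rl rest, h]

-- words produced by str.split() contain no whitespace character
theorem pvSplitGo_nospace : ∀ (s cur : List Char) (acc : List (List Char)),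
    (∀ ch ∈ cur, PySem.Chars.isspace ch = false) →
    (∀ w ∈ acc, ∀ ch ∈ w, PySem.Chars.isspace ch = false) →
    ∀ w ∈ PySem.Chars.split₀.go s cur acc, ∀ ch ∈ w, PySem.Chars.isspace ch = false
  | [], cur, acc, hcur, hacc => by
    simp only [PySem.Chars.split₀.go]
    split_ifs with h
    · intro w hw; exact hacc w (List.mem_reverse.mp hw)
    · intro w hw
      rcases List.mem_cons.mp (List.mem_reverse.mp hw) with rfl | hw
      · intro ch hch; exact hcur ch (List.mem_reverse.mp hch)
      · exact hacc w hw
  | c :: rest, cur, acc, hcur, hacc => by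
    simp only [PySem.Chars.split₀.go]
    split_ifs with h1 h2
    · exact pvSplitGo_nospace rest [] acc (by simp) hacc
    · refine pvSplitGo_nospace rest [] (cur.reverse :: acc) (by simp) ?_
      intro w hw
      rcases List.mem_cons.mp hw with rfl | hw
      · intro ch hch; exact hcur ch (List.mem_reverse.mp hch)
      · exact hacc w hw
    · refine pvSplitGo_nospace rest (c :: cur) acc ?_ hacc
      intro ch hch
      rcases List.mem_cons.mp hch with rfl | hch
      · simpa using h1
      · exact hcur ch hch

theorem pvSplit₀_nospace (s : List Char) :
    ∀ w ∈ PySem.Chars.split₀ s, ∀ ch ∈ w, PySem.Chars.isspace ch = false :=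
  pvSplitGo_nospace s [] [] (by simp) (by simp)

-- any character of a joined string comes from the separator or from one of the parts
theorem pvMem_join (sep : List Char) :
    ∀ (ws : List (List Char)) (ch : Char), ch ∈ PySem.Chars.join sep ws →
      ch ∈ sep ∨ ∃ w ∈ ws, ch ∈ w
  | [], ch, h => by simp [PySem.Chars.join_nil] at h
  | [w], ch, h => by
    rw [PySem.Chars.join_singleton] at h
    exact Or.inr ⟨w, by simp, h⟩
  | a :: b :: rest, ch, h => by
    rw [PySem.Chars.join_cons_cons] at h
    rcases List.mem_append.mp h with h | h
    · rcases List.mem_append.mp h with h | h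
      · exact Or.inr ⟨a, by simp, h⟩
      · exact Or.inl h
    · rcases pvMem_join sep (b :: rest) ch h with h | ⟨w, hw, hchw⟩
      · exact Or.inl h
      · exact Or.inr ⟨w, List.mem_cons_of_mem _ hw, hchw⟩

theorem pvPrefix_append_cons {α : Type} {c : α} :
    ∀ {p a : List α} {b : List α}, c ∉ p → (p <+: a ++ c :: b ↔ p <+: a) := by
  intro p
  induction p with
  | nil => intro a b _; simp
  | cons q p' ih =>
    intro a b hc
    cases a with
    | nil =>
      simp only [List.nil_append, List.cons_prefix_cons]
      constructor
      · rintro ⟨rfl, -⟩; exact absurd (List.mem_cons_self ..) hc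
      · intro h; exact absurd (List.prefix_nil.mp h) (by simp)
    | cons x a' =>
      simp only [List.cons_append, List.cons_prefix_cons]
      have hc' : c ∉ p' := fun h => hc (List.mem_cons_of_mem _ h)
      exact and_congr_right fun _ => ih hc'

theorem pvInfix_append_cons {α : Type} {p : List α} {c : α} (hc : c ∉ p) (hp : p ≠ []) :
    ∀ (a b : List α), (p <:+: a ++ c :: b ↔ p <:+: a ∨ p <:+: b) := by
  intro a
  induction a with
  | nil =>
    intro b
    simp only [List.nil_append, List.infix_cons_iff]
    constructor
    · rintro (h | h)
      · cases p with
        | nil => exact absurd rfl hp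
        | cons q p' =>
          rw [List.cons_prefix_cons] at h
          exact absurd (h.1 ▸ List.mem_cons_self ..) hc
      · exact Or.inr h
    · rintro (h | h)
      · rw [List.infix_nil] at h; exact absurd h hp
      · exact Or.inr h
  | cons x a' ih =>
    intro b
    rw [List.cons_append, List.infix_cons_iff, List.infix_cons_iff, ih b,
      show x :: (a' ++ c :: b) = (x :: a') ++ c :: b from rfl, pvPrefix_append_cons hc]
    tauto

theorem pvInfix_join {p : List Char} {c : Char} (hc : c ∉ p) (hp : p ≠ []) :
    ∀ l : List (List Char), (p <:+: PySem.Chars.join [c] l ↔ ∃ a ∈ l, p <:+: a)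
  | [] => by
    rw [PySem.Chars.join_nil, List.infix_nil]
    simp [hp]
  | [a] => by
    rw [PySem.Chars.join_singleton]; simp
  | a :: b :: rest => by
    rw [PySem.Chars.join_cons_cons,
      show a ++ [c] ++ PySem.Chars.join [c] (b :: rest)
         = a ++ c :: PySem.Chars.join [c] (b :: rest) by simp,
      pvInfix_append_cons hc hp, pvInfix_join hc hp (b :: rest)]
    constructor
    · rintro (h | ⟨w, hw, hpw⟩)
      · exact ⟨a, by simp, h⟩
      · exact ⟨w, List.mem_cons_of_mem _ hw, hpw⟩
    · rintro ⟨w, hw, hpw⟩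
      rcases List.mem_cons.mp hw with rfl | hw
      · exact Or.inl hpw
      · exact Or.inr ⟨w, hw, hpw⟩

theorem pvPhrase_no_newline (response : String) (i : Int) :
    '\n' ∉ (pvPhrase (PySem.Str.split₀ (PySem.Str.lower response)) i).toList := by
  intro hmem
  rw [pvPhrase, PySem.Str.toList_join] at hmem
  rcases pvMem_join _ _ _ hmem with h | ⟨w, hw, hchw⟩
  · simp at h
  · obtain ⟨w0, hw0, rfl⟩ := List.mem_map.mp hw
    have hw0' : w0 ∈ PySem.Str.split₀ (PySem.Str.lower response) :=
      PySem.List.mem_of_mem_slice _ _ _ hw0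
    have hmem' : w0.toList ∈ PySem.Chars.split₀ (PySem.Str.lower response).toList := by
      rw [← PySem.Str.split₀_map_toList]
      exact List.mem_map_of_mem hw0'
    have := pvSplit₀_nospace _ _ hmem' _ hchw
    simp [PySem.Chars.isspace] at this

-- with the phrase long and newline-free, membership in the joined haystack = membership in some context
theorem pvIsIn_haystack (response : String) (context_texts : List String) (i : Int)
    (hlen : 10 < PySem.Str.len (pvPhrase (PySem.Str.split₀ (PySem.Str.lower response)) i)) :
    (PySem.Str.isIn (pvPhrase (PySem.Str.split₀ (PySem.Str.lower response)) i)
        (PySem.Str.join "\n" (context_texts.map PySem.Str.lower)) = true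
      ↔ ∃ ct ∈ context_texts,
          PySem.Str.isIn (pvPhrase (PySem.Str.split₀ (PySem.Str.lower response)) i)
            (PySem.Str.lower ct) = true) := by
  have hp : (pvPhrase (PySem.Str.split₀ (PySem.Str.lower response)) i).toList ≠ [] := by
    rw [PySem.Str.len_eq] at hlen
    intro h; rw [h] at hlen; simp at hlen
  rw [PySem.Str.isIn_eq, PySem.Chars.isIn_iff_infix, PySem.Str.toList_join,
    show ("\n" : String).toList = ['\n'] from rfl, List.map_map,
    pvInfix_join (pvPhrase_no_newline response i) hp]
  constructor
  · rintro ⟨a, ha, hpa⟩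
    obtain ⟨ct, hct, rfl⟩ := List.mem_map.mp ha
    refine ⟨ct, hct, ?_⟩
    rw [PySem.Str.isIn_eq, PySem.Chars.isIn_iff_infix]
    exact hpa
  · rintro ⟨ct, hct, h⟩
    rw [PySem.Str.isIn_eq, PySem.Chars.isIn_iff_infix] at h
    exact ⟨(PySem.Str.lower ct).toList, List.mem_map_of_mem hct, h⟩

-- ===== VERDICT (by name: the statement is the Claim_ definition above) =====
theorem check_text_overlap_py_spec : Claim_equal_check_text_overlap_py := by
  intro response context_texts _
  unfold Spec_check_text_overlap_py check_text_overlap_py check_text_overlap_py_alt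
  rw [pvOuterA_eq]
  simp only [pvInnerA_eq, pvPhraseLoopB_eq]
  rw [Bool.eq_iff_iff]
  simp only [List.any_eq_true, Bool.and_eq_true, decide_eq_true_eq]
  constructor
  · rintro ⟨ct, hct, i, hi, hlen, hIn⟩
    exact ⟨i, hi, hlen, (pvIsIn_haystack response context_texts i hlen).mpr ⟨ct, hct, hIn⟩⟩
  · rintro ⟨i, hi, hlen, hIn⟩
    obtain ⟨ct, hct, h⟩ := (pvIsIn_haystack response context_texts i hlen).mp hIn
    exact ⟨ct, hct, i, hi, hlen, h⟩
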